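-- pv_equiv track=rewrite | github.com/crapas1974/algo2 | result/path/04_maxsum_path.py | max_path_sum_bottomup
-- ===== SOURCE A (Python) =====
-- def max_path_sum_bottomup(n, m, grid):
--     mps = [[0] * n for _ in range(m)]
--     move = {}
--
--     mps[0][0] = grid[0][0]
--     move[(0, 0)] = ['']
--
--     for i in range(n):
--         for j in range(m):
--             if i == 0 and j == 0:
--                 continue
--             if i == 0:
--                 mps[j][0] = mps[j - 1][0] + grid[j][0]
--                 move[(j, 0)] = [move[(j - 1, 0)][0] + 'D']
--             elif j == 0:
--                 mps[0][i] = mps[0][i - 1] + grid[0][i]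
--                 move[(0, i)] = [move[(0, i - 1)][0] + 'R']
--             else:
--                 move[(j, i)] = []
--                 if mps[j - 1][i] >= mps[j][i - 1]:
--                     mps[j][i] = mps[j - 1][i] + grid[j][i]
--                     for path in move[(j - 1, i)]:
--                         move[(j, i)].append(path + 'D')
--                 if mps[j - 1][i] <= mps[j][i - 1]:
--                     mps[j][i] = mps[j][i - 1] + grid[j][i]
--                     for path in move[(j, i - 1)]:
--                         move[(j, i)].append(path + 'R')
--
--     return mps[m - 1][n - 1], move[(m - 1, n - 1)]
-- ===== SOURCE B (Python) =====
-- def max_path_sum_bottomup(n, m, grid):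
--     # Pass 1: DP table of best sums only (row by row, no path bookkeeping).
--     dp = []
--     for j in range(m):
--         row = []
--         for i in range(n):
--             if j == 0 and i == 0:
--                 v = grid[0][0]
--             elif j == 0:
--                 v = row[i - 1] + grid[0][i]
--             elif i == 0:
--                 v = dp[j - 1][0] + grid[j][0]
--             else:
--                 v = max(dp[j - 1][i], row[i - 1]) + grid[j][i]
--             row.append(v)
--         dp.append(row)
--
--     # Pass 2: enumerate all optimal paths by backtracking from the destination.
--     def back(j, i):
--         if j == 0 and i == 0:
--             return ['']
--         res = []
--         if j > 0 and (i == 0 or dp[j - 1][i] >= dp[j][i - 1]):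
--             res += [p + 'D' for p in back(j - 1, i)]
--         if i > 0 and (j == 0 or dp[j - 1][i] <= dp[j][i - 1]):
--             res += [p + 'R' for p in back(j, i - 1)]
--         return res
--
--     return dp[m - 1][n - 1], back(m - 1, n - 1)
-- ===== Notes on version B (the rewrite author's own statement) =====
-- stated objective: alternative
-- what changed: A threads a dict of all optimal-path lists forward through the DP loop; B first fills a plain sums-only DP table and then enumerates the optimal paths by a separate backtracking recursion from the destination.
import Mathlib
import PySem

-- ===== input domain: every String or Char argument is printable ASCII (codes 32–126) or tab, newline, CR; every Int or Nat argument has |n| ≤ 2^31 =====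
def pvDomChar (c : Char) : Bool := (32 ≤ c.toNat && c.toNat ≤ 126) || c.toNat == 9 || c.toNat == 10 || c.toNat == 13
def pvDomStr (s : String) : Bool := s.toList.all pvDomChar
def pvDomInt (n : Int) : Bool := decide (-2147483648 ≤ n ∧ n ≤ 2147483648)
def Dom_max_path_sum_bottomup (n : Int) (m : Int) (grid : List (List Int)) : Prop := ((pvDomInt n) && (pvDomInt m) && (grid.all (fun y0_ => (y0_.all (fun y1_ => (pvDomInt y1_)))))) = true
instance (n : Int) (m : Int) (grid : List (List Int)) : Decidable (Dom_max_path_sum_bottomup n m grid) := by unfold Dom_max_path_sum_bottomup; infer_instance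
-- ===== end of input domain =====

-- Shared 2-D indexing helpers (Python xss[j][i] for the nonnegative, in-range indices these
-- ports use under Pre_; exact there since no negative wraparound can occur).
def pvGet2 (xss : List (List Int)) (j i : Nat) : Int := (xss.getD j []).getD i 0
def pvSet2 (xss : List (List Int)) (j i : Nat) (v : Int) : List (List Int) :=
  xss.set j ((xss.getD j []).set i v)

-- ===== PORT A =====
-- 'for path in move[(j,i_pred)]: move[(j,i)].append(path + suf)' as a fold over the source list
def pvAAppendLoop (k : Int × Int) (suf : String)
    (d : PySem.Dict (Int × Int) (List String)) (l : List String) :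
    PySem.Dict (Int × Int) (List String) :=
  l.foldl (fun d p => d.modify k [] (fun q => q ++ [p ++ suf])) d

-- body of A's inner loop over j (rows) for a fixed column i
def pvAInner (grid : List (List Int)) (i : Int)
    (st : List (List Int) × PySem.Dict (Int × Int) (List String)) (j : Int) :
    List (List Int) × PySem.Dict (Int × Int) (List String) :=
  if i = 0 ∧ j = 0 then st
  else if i = 0 then
    (pvSet2 st.1 j.toNat 0 (pvGet2 st.1 (j-1).toNat 0 + pvGet2 grid j.toNat 0),
     st.2.insert (j, 0) [PySem.List.pyGetD (st.2.getD (j-1, 0) []) 0 "" ++ "D"])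
  else if j = 0 then
    (pvSet2 st.1 0 i.toNat (pvGet2 st.1 0 (i-1).toNat + pvGet2 grid 0 i.toNat),
     st.2.insert (0, i) [PySem.List.pyGetD (st.2.getD (0, i-1) []) 0 "" ++ "R"])
  else
    let move1 := st.2.insert (j, i) ([] : List String)
    let st1 :=
      if pvGet2 st.1 (j-1).toNat i.toNat ≥ pvGet2 st.1 j.toNat (i-1).toNat then
        (pvSet2 st.1 j.toNat i.toNat (pvGet2 st.1 (j-1).toNat i.toNat + pvGet2 grid j.toNat i.toNat),
         pvAAppendLoop (j, i) "D" move1 (move1.getD (j-1, i) []))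
      else (st.1, move1)
    if pvGet2 st1.1 (j-1).toNat i.toNat ≤ pvGet2 st1.1 j.toNat (i-1).toNat then
      (pvSet2 st1.1 j.toNat i.toNat (pvGet2 st1.1 j.toNat (i-1).toNat + pvGet2 grid j.toNat i.toNat),
       pvAAppendLoop (j, i) "R" st1.2 (st1.2.getD (j, i-1) []))
    else st1

def max_path_sum_bottomup (n : Int) (m : Int) (grid : List (List Int)) : Int × List String :=
  let mps0 := List.replicate m.toNat (List.replicate n.toNat (0 : Int))
  let mps1 := pvSet2 mps0 0 0 (pvGet2 grid 0 0)
  let move0 := (PySem.Dict.empty : PySem.Dict (Int × Int) (List String)).insert (0, 0) [""]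
  let st := (PySem.List.pyRange 0 n 1).foldl
      (fun st i => (PySem.List.pyRange 0 m 1).foldl (pvAInner grid i) st) (mps1, move0)
  (pvGet2 st.1 (m-1).toNat (n-1).toNat, st.2.getD (m-1, n-1) [])

-- ===== PORT B =====
-- pass 1 of Source B: the sums-only DP table, built row by row
def pvBDp (n : Int) (m : Int) (grid : List (List Int)) : List (List Int) :=
  (PySem.List.pyRange 0 m 1).foldl (fun dp j =>
    dp ++ [(PySem.List.pyRange 0 n 1).foldl (fun row i =>
      row ++ [if j = 0 ∧ i = 0 then pvGet2 grid 0 0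
              else if j = 0 then row.getD (i-1).toNat 0 + pvGet2 grid 0 i.toNat
              else if i = 0 then pvGet2 dp (j-1).toNat 0 + pvGet2 grid j.toNat 0
              else max (pvGet2 dp (j-1).toNat i.toNat) (row.getD (i-1).toNat 0)
                     + pvGet2 grid j.toNat i.toNat]) []]) []

-- pass 2 of Source B: backtracking recursion from the destination (indices are the nonnegative
-- Python ints back() is called with, so Nat is exact)
def pvBack (dp : List (List Int)) (j i : Nat) : List String :=
  if j = 0 ∧ i = 0 then [""]
  else
    (if h1 : 0 < j ∧ (i = 0 ∨ pvGet2 dp (j-1) i ≥ pvGet2 dp j (i-1)) then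
        (pvBack dp (j-1) i).map (· ++ "D") else []) ++
    (if h2 : 0 < i ∧ (j = 0 ∨ pvGet2 dp (j-1) i ≤ pvGet2 dp j (i-1)) then
        (pvBack dp j (i-1)).map (· ++ "R") else [])
termination_by j + i
decreasing_by all_goals omega

def max_path_sum_bottomup_alt (n : Int) (m : Int) (grid : List (List Int)) : Int × List String :=
  let dp := pvBDp n m grid
  (pvGet2 dp (m-1).toNat (n-1).toNat, pvBack dp (m-1).toNat (n-1).toNat)

-- ===== PRECONDITION & SPEC =====
-- Pre_ excludes exactly the inputs where Python A raises (IndexError): it needs n, m >= 1 and a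
-- grid with at least m rows whose first m rows each have at least n entries.
def Pre_max_path_sum_bottomup (n : Int) (m : Int) (grid : List (List Int)) : Prop :=
  1 ≤ n ∧ 1 ≤ m ∧ m ≤ (grid.length : Int) ∧ ∀ row ∈ grid.take m.toNat, n ≤ (row.length : Int)
instance (n : Int) (m : Int) (grid : List (List Int)) : Decidable (Pre_max_path_sum_bottomup n m grid) := by
  unfold Pre_max_path_sum_bottomup; infer_instance
def pvWitness_max_path_sum_bottomup : Int × Int × List (List Int) := (2, 2, [[1, 2], [3, 4]])

def Spec_max_path_sum_bottomup (n : Int) (m : Int) (grid : List (List Int)) (out : Int × List String) : Prop := out = max_path_sum_bottomup_alt n m grid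
instance (n : Int) (m : Int) (grid : List (List Int)) (out : Int × List String) : Decidable (Spec_max_path_sum_bottomup n m grid out) := by unfold Spec_max_path_sum_bottomup; infer_instance

-- ===== CLAIM (what is proved, stated in full; the proofs are below) =====
def Claim_equal_max_path_sum_bottomup : Prop := ∀ (n : Int) (m : Int) (grid : List (List Int)), Dom_max_path_sum_bottomup n m grid → Pre_max_path_sum_bottomup n m grid → Spec_max_path_sum_bottomup n m grid (max_path_sum_bottomup n m grid)

-- ===== LEMMAS AND PROOFS =====


-- The mathematical DP value and the list of optimal paths at cell (j, i) (j = row, i = column);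
-- both ports are proved to compute these.
def dpf (grid : List (List Int)) : Nat → Nat → Int
  | 0, 0 => pvGet2 grid 0 0
  | j+1, 0 => dpf grid j 0 + pvGet2 grid (j+1) 0
  | 0, i+1 => dpf grid 0 i + pvGet2 grid 0 (i+1)
  | j+1, i+1 => max (dpf grid j (i+1)) (dpf grid (j+1) i) + pvGet2 grid (j+1) (i+1)

def pathsf (grid : List (List Int)) : Nat → Nat → List String
  | 0, 0 => [""]
  | j+1, 0 => (pathsf grid j 0).map (· ++ "D")
  | 0, i+1 => (pathsf grid 0 i).map (· ++ "R")
  | j+1, i+1 =>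
      (if dpf grid j (i+1) ≥ dpf grid (j+1) i then (pathsf grid j (i+1)).map (· ++ "D") else []) ++
      (if dpf grid j (i+1) ≤ dpf grid (j+1) i then (pathsf grid (j+1) i).map (· ++ "R") else [])

lemma pathsf_col0 (grid : List (List Int)) : ∀ j, ∃ s, pathsf grid j 0 = [s] := by
  intro j
  induction j with
  | zero => exact ⟨"", by simp [pathsf]⟩
  | succ j ih => obtain ⟨s, hs⟩ := ih; exact ⟨s ++ "D", by simp [pathsf, hs]⟩

lemma pathsf_row0 (grid : List (List Int)) : ∀ i, ∃ s, pathsf grid 0 i = [s] := by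
  intro i
  induction i with
  | zero => exact ⟨"", by simp [pathsf]⟩
  | succ i ih => obtain ⟨s, hs⟩ := ih; exact ⟨s ++ "R", by simp [pathsf, hs]⟩

-- pvSet2 / pvGet2 bookkeeping
lemma length_pvSet2 (xss : List (List Int)) (j i : Nat) (v : Int) :
    (pvSet2 xss j i v).length = xss.length := by simp [pvSet2]

lemma rows_pvSet2 {N : Nat} {xss : List (List Int)} (h : ∀ row ∈ xss, row.length = N)
    (j i : Nat) (v : Int) : ∀ row ∈ pvSet2 xss j i v, row.length = N := by
  intro row hrow
  by_cases hj : j < xss.length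
  · rcases List.mem_or_eq_of_mem_set hrow with h1 | h1
    · exact h row h1
    · subst h1
      simp only [List.length_set]
      exact h _ (by rw [List.getD_eq_getElem _ _ hj]; exact List.getElem_mem hj)
  · rw [pvSet2, List.set_eq_of_length_le (by omega)] at hrow
    exact h row hrow

lemma pvGet2_pvSet2_same {xss : List (List Int)} {j i : Nat}
    (hj : j < xss.length) (hi : i < (xss.getD j []).length) (v : Int) :
    pvGet2 (pvSet2 xss j i v) j i = v := by
  unfold pvGet2 pvSet2
  have h1 : (xss.set j ((xss.getD j []).set i v)).getD j [] = (xss.getD j []).set i v := by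
    rw [List.getD_eq_getElem?_getD, List.getElem?_set_self hj, Option.getD_some]
  rw [h1, List.getD_eq_getElem?_getD, List.getElem?_set_self hi, Option.getD_some]

lemma pvGet2_pvSet2_ne {j i j' i' : Nat} (xss : List (List Int)) (v : Int)
    (h : ¬ (j' = j ∧ i' = i)) :
    pvGet2 (pvSet2 xss j i v) j' i' = pvGet2 xss j' i' := by
  by_cases hj : j' = j
  · subst hj
    have hi : i' ≠ i := by tauto
    by_cases hjl : j' < xss.length
    · have h1 : (pvSet2 xss j' i v).getD j' [] = (xss.getD j' []).set i v := by
        rw [pvSet2, List.getD_eq_getElem?_getD, List.getElem?_set_self hjl, Option.getD_some]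
      have h2 : ((xss.getD j' []).set i v).getD i' 0 = (xss.getD j' []).getD i' 0 := by
        rw [List.getD_eq_getElem?_getD, List.getElem?_set_ne (by omega : i ≠ i'),
          ← List.getD_eq_getElem?_getD]
      unfold pvGet2
      rw [h1, h2]
    · rw [pvSet2, List.set_eq_of_length_le (by omega)]
  · have h1 : (pvSet2 xss j i v).getD j' [] = xss.getD j' [] := by
      rw [pvSet2, List.getD_eq_getElem?_getD, List.getElem?_set_ne (by omega : j ≠ j'),
        ← List.getD_eq_getElem?_getD]
    unfold pvGet2
    rw [h1]

-- the append loop only touches key k, where it appends the mapped paths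
lemma pvAAppendLoop_getD_same (k : Int × Int) (suf : String)
    (d : PySem.Dict (Int × Int) (List String)) (l : List String) :
    (pvAAppendLoop k suf d l).getD k [] = d.getD k [] ++ l.map (· ++ suf) := by
  induction l generalizing d with
  | nil => simp [pvAAppendLoop]
  | cons p l ih =>
      simp only [pvAAppendLoop, List.foldl_cons, List.map_cons] at *
      rw [ih, PySem.Dict.getD_modify_self]
      simp

lemma pvAAppendLoop_getD_ne (k k' : Int × Int) (suf : String)
    (d : PySem.Dict (Int × Int) (List String)) (l : List String) (h : k' ≠ k) :
    (pvAAppendLoop k suf d l).getD k' [] = d.getD k' [] := by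
  induction l generalizing d with
  | nil => simp [pvAAppendLoop]
  | cons p l ih =>
      simp only [pvAAppendLoop, List.foldl_cons] at *
      rw [ih, PySem.Dict.getD_modify]
      simp [h]

-- generic invariant lemma for 'for k in range(K): st = f(st, k)'
lemma pvFoldlRangeInv {α : Type} (f : α → Int → α) (P : Nat → α → Prop) (K : Nat) (st : α)
    (h0 : P 0 st) (hs : ∀ r a, r < K → P r a → P (r+1) (f a (r : Int))) :
    P K ((PySem.List.pyRange 0 (K : Int) 1).foldl f st) := by
  rw [PySem.List.pyRange_one]
  simp only [Int.sub_zero, Int.toNat_natCast, Int.zero_add]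
  rw [List.foldl_map]
  have aux : ∀ t, t ≤ K → P t ((List.range t).foldl (fun a (k : Nat) => f a (k : Int)) st) := by
    intro t ht
    induction t with
    | zero => simpa using h0
    | succ t ih =>
        rw [List.range_succ, List.foldl_append]
        exact hs _ _ (by omega) (ih (by omega))
  exact aux K le_rfl


lemma pvGetD_append_lt {α : Type} (l l' : List α) (d : α) (t : Nat) (h : t < l.length) :
    (l ++ l').getD t d = l.getD t d := by
  rw [List.getD_eq_getElem?_getD, List.getElem?_append_left h, ← List.getD_eq_getElem?_getD]

lemma pvGetD_append_len {α : Type} (l : List α) (v d : α) : (l ++ [v]).getD l.length d = v := by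
  simp [List.getD_eq_getElem?_getD]

lemma pvGetD_append_eq {α : Type} (l : List α) (v d : α) (t : Nat) (h : t = l.length) :
    (l ++ [v]).getD t d = v := by subst h; exact pvGetD_append_len l v d

lemma pvGet2_append_lt (dp : List (List Int)) (row : List Int) {j : Nat} (i : Nat)
    (h : j < dp.length) : pvGet2 (dp ++ [row]) j i = pvGet2 dp j i := by
  unfold pvGet2; rw [pvGetD_append_lt _ _ _ _ h]

lemma pvGet2_append_eq (dp : List (List Int)) (row : List Int) (j i : Nat) (h : j = dp.length) :
    pvGet2 (dp ++ [row]) j i = row.getD i 0 := by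
  unfold pvGet2; rw [pvGetD_append_eq _ _ _ _ h]

-- B's table contains exactly the DP values
lemma pvBDp_spec (grid : List (List Int)) (N M : Nat) :
    (pvBDp (N : Int) (M : Int) grid).length = M ∧
    (∀ row ∈ pvBDp (N : Int) (M : Int) grid, row.length = N) ∧
    ∀ j i, j < M → i < N → pvGet2 (pvBDp (N : Int) (M : Int) grid) j i = dpf grid j i := by
  unfold pvBDp
  refine pvFoldlRangeInv _
    (fun jj (dp : List (List Int)) => dp.length = jj ∧ (∀ row ∈ dp, row.length = N) ∧
      ∀ j i, j < jj → i < N → pvGet2 dp j i = dpf grid j i) M [] (by simp) ?_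
  rintro jj dp hjj ⟨hlen, hrows, hcells⟩
  have hQ := pvFoldlRangeInv
    (fun (row : List Int) (i : Int) =>
      row ++ [if (jj : Int) = 0 ∧ i = 0 then pvGet2 grid 0 0
              else if (jj : Int) = 0 then row.getD (i-1).toNat 0 + pvGet2 grid 0 i.toNat
              else if i = 0 then pvGet2 dp ((jj : Int)-1).toNat 0 + pvGet2 grid ((jj : Int)).toNat 0
              else max (pvGet2 dp ((jj : Int)-1).toNat i.toNat) (row.getD (i-1).toNat 0)
                     + pvGet2 grid ((jj : Int)).toNat i.toNat])
    (fun r (row : List Int) => row.length = r ∧ ∀ i' < r, row.getD i' 0 = dpf grid jj i') N []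
    (by simp)
    (by
      rintro r row hr ⟨hrl, hrc⟩
      refine ⟨by simp [hrl], ?_⟩
      intro i' hi'
      rcases Nat.lt_succ_iff_lt_or_eq.1 hi' with h | h
      · rw [pvGetD_append_lt _ _ _ _ (by omega)]; exact hrc i' h
      · rw [h, pvGetD_append_eq _ _ _ _ (by omega)]
        have hnz : ((r : Nat) : Int).toNat = r := by omega
        split_ifs with h1 h2 h3
        · have e1 : jj = 0 := by exact_mod_cast h1.1
          have e2 : r = 0 := by exact_mod_cast h1.2
          subst e1; subst e2
          simp [dpf]
        · have e1 : jj = 0 := by exact_mod_cast h2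
          subst e1
          rcases r with _ | r'
          · exact absurd ⟨by norm_num, by norm_num⟩ h1
          · have t1 : (((r'+1 : Nat) : Int) - 1).toNat = r' := by omega
            rw [t1, hnz, hrc r' (by omega)]
            simp [dpf]
        · have e2 : r = 0 := by exact_mod_cast h3
          subst e2
          rcases jj with _ | jj'
          · simp at h2
          · have t1 : (((jj'+1 : Nat) : Int) - 1).toNat = jj' := by omega
            have t2 : ((jj'+1 : Nat) : Int).toNat = jj' + 1 := by omega
            rw [t1, t2, hcells jj' 0 (by omega) (by omega)]
            simp [dpf]
        · rcases jj with _ | jj'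
          · simp at h2
          rcases r with _ | r'
          · simp at h3
          have t1 : (((jj'+1 : Nat) : Int) - 1).toNat = jj' := by omega
          have t2 : ((jj'+1 : Nat) : Int).toNat = jj' + 1 := by omega
          have t3 : (((r'+1 : Nat) : Int) - 1).toNat = r' := by omega
          have t4 : ((r'+1 : Nat) : Int).toNat = r' + 1 := by omega
          rw [t1, t2, t3, t4, hcells jj' (r'+1) (by omega) (by omega), hrc r' (by omega)]
          simp [dpf])
  obtain ⟨hrl, hrc⟩ := hQ
  refine ⟨by simp [hlen], ?_, ?_⟩
  · intro row hmem
    rcases List.mem_append.1 hmem with h | h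
    · exact hrows row h
    · rw [List.mem_singleton] at h; subst h; exact hrl
  · intro j i hj hi
    rcases Nat.lt_succ_iff_lt_or_eq.1 hj with h | h
    · rw [pvGet2_append_lt _ _ _ (by omega)]; exact hcells j i h hi
    · rw [h, pvGet2_append_eq _ _ _ _ (by omega)]
      exact hrc i hi

-- B's backtracking recursion returns exactly the optimal-path lists
lemma pvBack_eq_pathsf (grid dp : List (List Int)) (N M : Nat)
    (hcell : ∀ j i, j < M → i < N → pvGet2 dp j i = dpf grid j i) :
    ∀ k j i, j + i ≤ k → j < M → i < N → pvBack dp j i = pathsf grid j i := by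
  intro k
  induction k with
  | zero =>
      intro j i h hj hi
      have hj0 : j = 0 := by omega
      have hi0 : i = 0 := by omega
      subst hj0; subst hi0
      rw [pvBack]; simp [pathsf]
  | succ k ih =>
      intro j i h hj hi
      match j, i with
      | 0, 0 => rw [pvBack]; simp [pathsf]
      | j+1, 0 =>
          rw [pvBack, pathsf]
          simp only [Nat.add_sub_cancel]
          rw [ih j 0 (by omega) (by omega) hi]
          simp
      | 0, i+1 =>
          rw [pvBack, pathsf]
          simp only [Nat.add_sub_cancel]
          rw [ih 0 i (by omega) hj (by omega)]
          simp
      | j+1, i+1 =>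
          rw [pvBack, pathsf]
          simp only [Nat.add_sub_cancel]
          have e1 : pvGet2 dp j (i+1) = dpf grid j (i+1) := hcell _ _ (by omega) (by omega)
          have e2 : pvGet2 dp (j+1) i = dpf grid (j+1) i := hcell _ _ (by omega) (by omega)
          rw [ih j (i+1) (by omega) (by omega) hi, ih (j+1) i (by omega) hj (by omega)]
          simp only [e1, e2]
          split_ifs <;> simp_all

-- B computes (dpf, pathsf) at the destination
lemma alt_eq_math (grid : List (List Int)) (N M : Nat) (hN : 0 < N) (hM : 0 < M) :
    max_path_sum_bottomup_alt (N : Int) (M : Int) grid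
      = (dpf grid (M-1) (N-1), pathsf grid (M-1) (N-1)) := by
  obtain ⟨hlen, hrows, hcells⟩ := pvBDp_spec grid N M
  unfold max_path_sum_bottomup_alt
  have h1 : ((M : Int) - 1).toNat = M - 1 := by omega
  have h2 : ((N : Int) - 1).toNat = N - 1 := by omega
  simp only [h1, h2]
  rw [hcells (M-1) (N-1) (by omega) (by omega),
    pvBack_eq_pathsf grid _ N M hcells ((M-1)+(N-1)) (M-1) (N-1) le_rfl (by omega) (by omega)]


-- A-side loop invariant: after fully processing columns < c and rows < r of column c,
-- every processed cell (and the initialised origin) holds the DP value and its path list.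
def pvInvA (grid : List (List Int)) (M N c r : Nat)
    (st : List (List Int) × PySem.Dict (Int × Int) (List String)) : Prop :=
  st.1.length = M ∧ (∀ row ∈ st.1, row.length = N) ∧
  ∀ j i : Nat, j < M → i < N → (i < c ∨ (j = 0 ∧ i = 0) ∨ (i = c ∧ j < r)) →
    pvGet2 st.1 j i = dpf grid j i ∧ st.2.getD ((j : Int), (i : Int)) [] = pathsf grid j i

lemma pvGetD_mem {xss : List (List Int)} {j : Nat} (h : j < xss.length) :
    xss.getD j [] ∈ xss := by
  rw [List.getD_eq_getElem _ _ h]; exact List.getElem_mem h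

lemma pvInvA_extend (grid : List (List Int)) (M N c r : Nat) (hc : c < N) (hr : r < M)
    (mps : List (List Int)) (d d' : PySem.Dict (Int × Int) (List String))
    (hlen : mps.length = M) (hrows : ∀ row ∈ mps, row.length = N)
    (hcells : ∀ j i : Nat, j < M → i < N → (i < c ∨ (j = 0 ∧ i = 0) ∨ (i = c ∧ j < r)) →
      pvGet2 mps j i = dpf grid j i ∧ d.getD ((j : Int), (i : Int)) [] = pathsf grid j i)
    (hd' : ∀ k' : Int × Int, k' ≠ ((r : Int), (c : Int)) → d'.getD k' [] = d.getD k' [])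
    (hdrc : d'.getD ((r : Int), (c : Int)) [] = pathsf grid r c) :
    pvInvA grid M N c (r+1) (pvSet2 mps r c (dpf grid r c), d') := by
  refine ⟨?_, ?_, ?_⟩
  · show (pvSet2 mps r c (dpf grid r c)).length = M
    simp [length_pvSet2, hlen]
  · show ∀ row ∈ pvSet2 mps r c (dpf grid r c), row.length = N
    exact rows_pvSet2 hrows _ _ _
  · intro j i hj hi hg
    by_cases hji : j = r ∧ i = c
    · obtain ⟨rfl, rfl⟩ := hji
      constructor
      · show pvGet2 (pvSet2 mps j i (dpf grid j i)) j i = dpf grid j i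
        rw [pvGet2_pvSet2_same (by omega) (by rw [hrows _ (pvGetD_mem (by omega))]; omega)]
      · exact hdrc
    · have hgood : i < c ∨ (j = 0 ∧ i = 0) ∨ (i = c ∧ j < r) := by omega
      constructor
      · show pvGet2 (pvSet2 mps r c (dpf grid r c)) j i = dpf grid j i
        rw [pvGet2_pvSet2_ne _ _ (by omega)]
        exact (hcells j i hj hi hgood).1
      · show d'.getD ((j : Int), (i : Int)) [] = pathsf grid j i
        rw [hd' _ (by simp [Prod.ext_iff]; omega)]
        exact (hcells j i hj hi hgood).2

-- closed forms of one inner-loop step of A, per region of the cell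
lemma pvAInner_origin (grid : List (List Int)) (st : List (List Int) × PySem.Dict (Int × Int) (List String)) :
    pvAInner grid ((0 : Nat) : Int) st ((0 : Nat) : Int) = st := by simp [pvAInner]

lemma pvAInner_col0 (grid : List (List Int)) (st : List (List Int) × PySem.Dict (Int × Int) (List String)) (r' : Nat) :
    pvAInner grid ((0 : Nat) : Int) st (((r'+1 : Nat)) : Int) =
    (pvSet2 st.1 (r'+1) 0 (pvGet2 st.1 r' 0 + pvGet2 grid (r'+1) 0),
     st.2.insert (((r'+1 : Nat) : Int), 0)
       [PySem.List.pyGetD (st.2.getD (((r' : Nat) : Int), 0) []) 0 "" ++ "D"]) := by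
  have t3 : ((r'+1 : Nat) : Int) - 1 = ((r' : Nat) : Int) := by push_cast; ring
  have hne : ((r' : Nat) : Int) + 1 ≠ 0 := by omega
  simp [pvAInner, t3, hne]

lemma pvAInner_row0 (grid : List (List Int)) (st : List (List Int) × PySem.Dict (Int × Int) (List String)) (c' : Nat) :
    pvAInner grid (((c'+1 : Nat)) : Int) st ((0 : Nat) : Int) =
    (pvSet2 st.1 0 (c'+1) (pvGet2 st.1 0 c' + pvGet2 grid 0 (c'+1)),
     st.2.insert ((0 : Int), ((c'+1 : Nat) : Int))
       [PySem.List.pyGetD (st.2.getD ((0 : Int), ((c' : Nat) : Int)) []) 0 "" ++ "R"]) := by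
  have u3 : ((c'+1 : Nat) : Int) - 1 = ((c' : Nat) : Int) := by push_cast; ring
  have hne : ((c' : Nat) : Int) + 1 ≠ 0 := by omega
  simp [pvAInner, u3, hne]

lemma pvAInner_int_TT (grid : List (List Int)) (st : List (List Int) × PySem.Dict (Int × Int) (List String)) (r' c' : Nat)
    (hge : pvGet2 st.1 r' (c'+1) ≥ pvGet2 st.1 (r'+1) c')
    (hle : pvGet2 st.1 r' (c'+1) ≤ pvGet2 st.1 (r'+1) c') :
    pvAInner grid (((c'+1 : Nat)) : Int) st (((r'+1 : Nat)) : Int) =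
    (pvSet2 (pvSet2 st.1 (r'+1) (c'+1) (pvGet2 st.1 r' (c'+1) + pvGet2 grid (r'+1) (c'+1)))
        (r'+1) (c'+1) (pvGet2 st.1 (r'+1) c' + pvGet2 grid (r'+1) (c'+1)),
     pvAAppendLoop (((r'+1 : Nat) : Int), ((c'+1 : Nat) : Int)) "R"
       (pvAAppendLoop (((r'+1 : Nat) : Int), ((c'+1 : Nat) : Int)) "D"
         (st.2.insert (((r'+1 : Nat) : Int), ((c'+1 : Nat) : Int)) [])
         ((st.2.insert (((r'+1 : Nat) : Int), ((c'+1 : Nat) : Int)) []).getD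
           (((r' : Nat) : Int), ((c'+1 : Nat) : Int)) []))
       ((pvAAppendLoop (((r'+1 : Nat) : Int), ((c'+1 : Nat) : Int)) "D"
         (st.2.insert (((r'+1 : Nat) : Int), ((c'+1 : Nat) : Int)) [])
         ((st.2.insert (((r'+1 : Nat) : Int), ((c'+1 : Nat) : Int)) []).getD
           (((r' : Nat) : Int), ((c'+1 : Nat) : Int)) [])).getD
         (((r'+1 : Nat) : Int), ((c' : Nat) : Int)) [])) := by
  have t3 : ((r'+1 : Nat) : Int) - 1 = ((r' : Nat) : Int) := by push_cast; ring
  have u3 : ((c'+1 : Nat) : Int) - 1 = ((c' : Nat) : Int) := by push_cast; ring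
  have hne1 : ((r' : Nat) : Int) + 1 ≠ 0 := by omega
  have hne2 : ((c' : Nat) : Int) + 1 ≠ 0 := by omega
  have e1 : pvGet2 (pvSet2 st.1 (r'+1) (c'+1) (pvGet2 st.1 r' (c'+1) + pvGet2 grid (r'+1) (c'+1))) r' (c'+1)
      = pvGet2 st.1 r' (c'+1) := pvGet2_pvSet2_ne _ _ (by omega)
  have e2 : pvGet2 (pvSet2 st.1 (r'+1) (c'+1) (pvGet2 st.1 r' (c'+1) + pvGet2 grid (r'+1) (c'+1))) (r'+1) c'
      = pvGet2 st.1 (r'+1) c' := pvGet2_pvSet2_ne _ _ (by omega)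
  simp [pvAInner, t3, u3, hne1, hne2, e1, e2, hge, hle]

lemma pvAInner_int_TF (grid : List (List Int)) (st : List (List Int) × PySem.Dict (Int × Int) (List String)) (r' c' : Nat)
    (hge : pvGet2 st.1 r' (c'+1) ≥ pvGet2 st.1 (r'+1) c')
    (hnle : ¬ pvGet2 st.1 r' (c'+1) ≤ pvGet2 st.1 (r'+1) c') :
    pvAInner grid (((c'+1 : Nat)) : Int) st (((r'+1 : Nat)) : Int) =
    (pvSet2 st.1 (r'+1) (c'+1) (pvGet2 st.1 r' (c'+1) + pvGet2 grid (r'+1) (c'+1)),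
     pvAAppendLoop (((r'+1 : Nat) : Int), ((c'+1 : Nat) : Int)) "D"
       (st.2.insert (((r'+1 : Nat) : Int), ((c'+1 : Nat) : Int)) [])
       ((st.2.insert (((r'+1 : Nat) : Int), ((c'+1 : Nat) : Int)) []).getD
         (((r' : Nat) : Int), ((c'+1 : Nat) : Int)) [])) := by
  have t3 : ((r'+1 : Nat) : Int) - 1 = ((r' : Nat) : Int) := by push_cast; ring
  have u3 : ((c'+1 : Nat) : Int) - 1 = ((c' : Nat) : Int) := by push_cast; ring
  have hne1 : ((r' : Nat) : Int) + 1 ≠ 0 := by omega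
  have hne2 : ((c' : Nat) : Int) + 1 ≠ 0 := by omega
  have e1 : pvGet2 (pvSet2 st.1 (r'+1) (c'+1) (pvGet2 st.1 r' (c'+1) + pvGet2 grid (r'+1) (c'+1))) r' (c'+1)
      = pvGet2 st.1 r' (c'+1) := pvGet2_pvSet2_ne _ _ (by omega)
  have e2 : pvGet2 (pvSet2 st.1 (r'+1) (c'+1) (pvGet2 st.1 r' (c'+1) + pvGet2 grid (r'+1) (c'+1))) (r'+1) c'
      = pvGet2 st.1 (r'+1) c' := pvGet2_pvSet2_ne _ _ (by omega)
  simp [pvAInner, t3, u3, hne1, hne2, e1, e2, hge, hnle]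

lemma pvAInner_int_FT (grid : List (List Int)) (st : List (List Int) × PySem.Dict (Int × Int) (List String)) (r' c' : Nat)
    (hnge : ¬ pvGet2 st.1 r' (c'+1) ≥ pvGet2 st.1 (r'+1) c')
    (hle : pvGet2 st.1 r' (c'+1) ≤ pvGet2 st.1 (r'+1) c') :
    pvAInner grid (((c'+1 : Nat)) : Int) st (((r'+1 : Nat)) : Int) =
    (pvSet2 st.1 (r'+1) (c'+1) (pvGet2 st.1 (r'+1) c' + pvGet2 grid (r'+1) (c'+1)),
     pvAAppendLoop (((r'+1 : Nat) : Int), ((c'+1 : Nat) : Int)) "R"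
       (st.2.insert (((r'+1 : Nat) : Int), ((c'+1 : Nat) : Int)) [])
       ((st.2.insert (((r'+1 : Nat) : Int), ((c'+1 : Nat) : Int)) []).getD
         (((r'+1 : Nat) : Int), ((c' : Nat) : Int)) [])) := by
  have t3 : ((r'+1 : Nat) : Int) - 1 = ((r' : Nat) : Int) := by push_cast; ring
  have u3 : ((c'+1 : Nat) : Int) - 1 = ((c' : Nat) : Int) := by push_cast; ring
  have hne1 : ((r' : Nat) : Int) + 1 ≠ 0 := by omega
  have hne2 : ((c' : Nat) : Int) + 1 ≠ 0 := by omega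
  simp [pvAInner, t3, u3, hne1, hne2, hnge, hle]

lemma pvInvA_step (grid : List (List Int)) (M N c r : Nat) (hc : c < N) (hr : r < M)
    (st : List (List Int) × PySem.Dict (Int × Int) (List String))
    (h : pvInvA grid M N c r st) :
    pvInvA grid M N c (r+1) (pvAInner grid (c : Int) st (r : Int)) := by
  obtain ⟨hlen, hrows, hcells⟩ := h
  by_cases hc0 : c = 0
  · subst hc0
    by_cases hr0 : r = 0
    · subst hr0
      rw [pvAInner_origin]
      exact ⟨hlen, hrows, fun j i hj hi hg => hcells j i hj hi (by omega)⟩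
    · obtain ⟨r', rfl⟩ : ∃ r', r = r' + 1 := ⟨r - 1, by omega⟩
      have hprev := hcells r' 0 (by omega) (by omega) (by omega)
      simp only [Nat.cast_zero] at hprev
      obtain ⟨s, hs⟩ := pathsf_col0 grid r'
      rw [pvAInner_col0]
      rw [hprev.1]
      have hv : dpf grid r' 0 + pvGet2 grid (r'+1) 0 = dpf grid (r'+1) 0 := by simp [dpf]
      rw [hv, hprev.2, hs]
      have hp : PySem.List.pyGetD [s] 0 "" = s := rfl
      rw [hp]
      have hext := pvInvA_extend grid M N 0 (r'+1) hc hr st.1 st.2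
        (st.2.insert (((r'+1 : Nat) : Int), (0 : Int)) [s ++ "D"])
        hlen hrows hcells
        (fun k' hk => by
          rw [PySem.Dict.getD_insert, if_neg (by simpa [Nat.cast_zero] using hk)])
        (by
          rw [PySem.Dict.getD_insert, if_pos (by simp)]
          simp [pathsf, hs])
      simpa [Nat.cast_zero] using hext
  · obtain ⟨c', rfl⟩ : ∃ c', c = c' + 1 := ⟨c - 1, by omega⟩
    by_cases hr0 : r = 0
    · subst hr0
      have hprev := hcells 0 c' (by omega) (by omega) (by omega)
      simp only [Nat.cast_zero] at hprev
      obtain ⟨s, hs⟩ := pathsf_row0 grid c'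
      rw [pvAInner_row0]
      rw [hprev.1]
      have hv : dpf grid 0 c' + pvGet2 grid 0 (c'+1) = dpf grid 0 (c'+1) := by simp [dpf]
      rw [hv, hprev.2, hs]
      have hp : PySem.List.pyGetD [s] 0 "" = s := rfl
      rw [hp]
      have hext := pvInvA_extend grid M N (c'+1) 0 hc hr st.1 st.2
        (st.2.insert ((0 : Int), ((c'+1 : Nat) : Int)) [s ++ "R"])
        hlen hrows hcells
        (fun k' hk => by
          rw [PySem.Dict.getD_insert, if_neg (by simpa [Nat.cast_zero] using hk)])
        (by
          rw [PySem.Dict.getD_insert, if_pos (by simp)]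
          simp [pathsf, hs])
      simpa [Nat.cast_zero] using hext
    · -- interior cell: both indices ≥ 1
      obtain ⟨r', rfl⟩ : ∃ r', r = r' + 1 := ⟨r - 1, by omega⟩
      have ha := hcells r' (c'+1) (by omega) (by omega) (by omega)
      have hb := hcells (r'+1) c' (by omega) (by omega) (by omega)
      have habD : dpf grid r' (c'+1) ≥ dpf grid (r'+1) c' ↔
          pvGet2 st.1 r' (c'+1) ≥ pvGet2 st.1 (r'+1) c' := by rw [ha.1, hb.1]
      have habD' : dpf grid r' (c'+1) ≤ dpf grid (r'+1) c' ↔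
          pvGet2 st.1 r' (c'+1) ≤ pvGet2 st.1 (r'+1) c' := by rw [ha.1, hb.1]
      have hsrcD : (st.2.insert (((r'+1 : Nat) : Int), ((c'+1 : Nat) : Int)) []).getD
          (((r' : Nat) : Int), ((c'+1 : Nat) : Int)) [] = pathsf grid r' (c'+1) := by
        rw [PySem.Dict.getD_insert, if_neg (by simp [Prod.ext_iff])]; exact ha.2
      have hsrcR0 : (st.2.insert (((r'+1 : Nat) : Int), ((c'+1 : Nat) : Int)) []).getD
          (((r'+1 : Nat) : Int), ((c' : Nat) : Int)) [] = pathsf grid (r'+1) c' := by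
        rw [PySem.Dict.getD_insert, if_neg (by simp [Prod.ext_iff])]; exact hb.2
      by_cases hab : pvGet2 st.1 r' (c'+1) ≥ pvGet2 st.1 (r'+1) c'
      · set D2 := pvAAppendLoop (((r'+1 : Nat) : Int), ((c'+1 : Nat) : Int)) "D"
          (st.2.insert (((r'+1 : Nat) : Int), ((c'+1 : Nat) : Int)) [])
          (pathsf grid r' (c'+1)) with hD2
        have hD2ne : ∀ k', k' ≠ (((r'+1 : Nat) : Int), ((c'+1 : Nat) : Int)) →
            D2.getD k' [] = st.2.getD k' [] := by
          intro k' hk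
          rw [hD2, pvAAppendLoop_getD_ne _ _ _ _ _ hk, PySem.Dict.getD_insert, if_neg hk]
        have hD2key : D2.getD (((r'+1 : Nat) : Int), ((c'+1 : Nat) : Int)) []
            = (pathsf grid r' (c'+1)).map (· ++ "D") := by
          rw [hD2, pvAAppendLoop_getD_same, PySem.Dict.getD_insert, if_pos rfl]
          simp
        by_cases hab2 : pvGet2 st.1 r' (c'+1) ≤ pvGet2 st.1 (r'+1) c'
        · rw [pvAInner_int_TT grid st r' c' hab hab2, hsrcD]
          have hsrcR : D2.getD (((r'+1 : Nat) : Int), ((c' : Nat) : Int)) []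
              = pathsf grid (r'+1) c' := by
            rw [hD2ne _ (by simp [Prod.ext_iff])]; exact hb.2
          rw [← hD2, hsrcR]
          have hvB : pvGet2 st.1 (r'+1) c' + pvGet2 grid (r'+1) (c'+1) = dpf grid (r'+1) (c'+1) := by
            rw [hb.1, dpf, max_eq_right (habD'.2 hab2)]
          rw [hvB]
          have hWlen : (pvSet2 st.1 (r'+1) (c'+1) (pvGet2 st.1 r' (c'+1) + pvGet2 grid (r'+1) (c'+1))).length = M := by
            rw [length_pvSet2, hlen]
          have hWrows := rows_pvSet2 hrows (r'+1) (c'+1) (pvGet2 st.1 r' (c'+1) + pvGet2 grid (r'+1) (c'+1))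
          have hWcells : ∀ j i : Nat, j < M → i < N →
              (i < c'+1 ∨ (j = 0 ∧ i = 0) ∨ (i = c'+1 ∧ j < r'+1)) →
              pvGet2 (pvSet2 st.1 (r'+1) (c'+1) (pvGet2 st.1 r' (c'+1) + pvGet2 grid (r'+1) (c'+1))) j i = dpf grid j i ∧
                D2.getD ((j : Int), (i : Int)) [] = pathsf grid j i := by
            intro j i hj hi hg
            refine ⟨?_, ?_⟩
            · rw [pvGet2_pvSet2_ne _ _ (by omega)]
              exact (hcells j i hj hi hg).1
            · rw [hD2ne _ (by simp [Prod.ext_iff]; omega)]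
              exact (hcells j i hj hi hg).2
          refine pvInvA_extend grid M N (c'+1) (r'+1) hc hr _ D2 _ hWlen hWrows hWcells ?_ ?_
          · intro k' hk
            rw [pvAAppendLoop_getD_ne _ _ _ _ _ hk]
          · rw [pvAAppendLoop_getD_same, hD2key, pathsf,
              if_pos (habD.2 hab), if_pos (habD'.2 hab2)]
        · rw [pvAInner_int_TF grid st r' c' hab hab2, hsrcD]
          have hvA : pvGet2 st.1 r' (c'+1) + pvGet2 grid (r'+1) (c'+1) = dpf grid (r'+1) (c'+1) := by
            rw [ha.1, dpf, max_eq_left (by rw [← ha.1, ← hb.1]; omega)]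
          rw [hvA, ← hD2]
          refine pvInvA_extend grid M N (c'+1) (r'+1) hc hr st.1 st.2 D2
            hlen hrows hcells hD2ne ?_
          rw [hD2key, pathsf, if_pos (habD.2 hab), if_neg (fun hx => hab2 (habD'.1 hx))]
          simp
      · have hab2 : pvGet2 st.1 r' (c'+1) ≤ pvGet2 st.1 (r'+1) c' := by omega
        rw [pvAInner_int_FT grid st r' c' hab hab2, hsrcR0]
        have hvB : pvGet2 st.1 (r'+1) c' + pvGet2 grid (r'+1) (c'+1) = dpf grid (r'+1) (c'+1) := by
          rw [hb.1, dpf, max_eq_right (habD'.2 hab2)]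
        rw [hvB]
        refine pvInvA_extend grid M N (c'+1) (r'+1) hc hr st.1 st.2 _
          hlen hrows hcells ?_ ?_
        · intro k' hk
          rw [pvAAppendLoop_getD_ne _ _ _ _ _ hk, PySem.Dict.getD_insert, if_neg hk]
        · rw [pvAAppendLoop_getD_same, PySem.Dict.getD_insert, if_pos rfl, pathsf,
            if_neg (fun hx => hab (habD.1 hx)), if_pos (habD'.2 hab2)]

lemma pvInvA_init (grid : List (List Int)) (M N : Nat) (hM : 0 < M) (hN : 0 < N) :
    pvInvA grid M N 0 0
      (pvSet2 (List.replicate M (List.replicate N (0 : Int))) 0 0 (pvGet2 grid 0 0),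
       (PySem.Dict.empty : PySem.Dict (Int × Int) (List String)).insert (0, 0) [""]) := by
  have hrep : ∀ row ∈ List.replicate M (List.replicate N (0 : Int)), row.length = N := by
    intro row h
    rw [List.eq_of_mem_replicate h]
    simp
  refine ⟨?_, ?_, ?_⟩
  · show (pvSet2 (List.replicate M (List.replicate N (0 : Int))) 0 0 (pvGet2 grid 0 0)).length = M
    simp [length_pvSet2]
  · exact rows_pvSet2 hrep _ _ _
  · intro j i hj hi hg
    have e1 : j = 0 := by omega
    have e2 : i = 0 := by omega
    subst e1; subst e2
    constructor
    · show pvGet2 (pvSet2 (List.replicate M (List.replicate N (0 : Int))) 0 0 (pvGet2 grid 0 0)) 0 0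
        = dpf grid 0 0
      rw [pvGet2_pvSet2_same (by simpa using hM)
        (by rw [hrep _ (pvGetD_mem (by simpa using hM))]; omega)]
      rw [dpf]
    · show ((PySem.Dict.empty : PySem.Dict (Int × Int) (List String)).insert (0, 0) [""]).getD
        (((0 : Nat) : Int), ((0 : Nat) : Int)) [] = pathsf grid 0 0
      rw [PySem.Dict.getD_insert, if_pos (by simp)]
      rw [pathsf]

lemma pvInvA_advance (grid : List (List Int)) (M N c : Nat)
    (st : List (List Int) × PySem.Dict (Int × Int) (List String))
    (h : pvInvA grid M N c M st) : pvInvA grid M N (c+1) 0 st := by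
  obtain ⟨hlen, hrows, hcells⟩ := h
  exact ⟨hlen, hrows, fun j i hj hi hg => hcells j i hj hi (by omega)⟩

-- A computes (dpf, pathsf) at the destination
lemma a_eq_math (grid : List (List Int)) (N M : Nat) (hN : 0 < N) (hM : 0 < M) :
    max_path_sum_bottomup (N : Int) (M : Int) grid
      = (dpf grid (M-1) (N-1), pathsf grid (M-1) (N-1)) := by
  unfold max_path_sum_bottomup
  have hMt : ((M : Int)).toNat = M := by omega
  have hNt : ((N : Int)).toNat = N := by omega
  rw [hMt, hNt]
  have hinv : pvInvA grid M N N 0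
      ((PySem.List.pyRange 0 (N : Int) 1).foldl
        (fun st i => (PySem.List.pyRange 0 (M : Int) 1).foldl (pvAInner grid i) st)
        (pvSet2 (List.replicate M (List.replicate N (0 : Int))) 0 0 (pvGet2 grid 0 0),
         (PySem.Dict.empty : PySem.Dict (Int × Int) (List String)).insert (0, 0) [""])) := by
    have := pvFoldlRangeInv
      (fun st i => (PySem.List.pyRange 0 (M : Int) 1).foldl (pvAInner grid i) st)
      (fun c st => pvInvA grid M N c 0 st) N
      (pvSet2 (List.replicate M (List.replicate N (0 : Int))) 0 0 (pvGet2 grid 0 0),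
       (PySem.Dict.empty : PySem.Dict (Int × Int) (List String)).insert (0, 0) [""])
      (pvInvA_init grid M N hM hN)
      (fun cc st hcc hstep => by
        refine pvInvA_advance grid M N cc _ ?_
        exact pvFoldlRangeInv (pvAInner grid (cc : Int))
          (fun r st' => pvInvA grid M N cc r st') M st hstep
          (fun r a hrM hInv => pvInvA_step grid M N cc r hcc hrM a hInv))
    exact this
  obtain ⟨hlen, hrows, hcells⟩ := hinv
  have hcell := hcells (M-1) (N-1) (by omega) (by omega) (by omega)
  have k1 : ((M : Int) - 1).toNat = M - 1 := by omega
  have k2 : ((N : Int) - 1).toNat = N - 1 := by omega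
  have k3 : ((M : Int) - 1) = ((M - 1 : Nat) : Int) := by omega
  have k4 : ((N : Int) - 1) = ((N - 1 : Nat) : Int) := by omega
  rw [k1, k2, k3, k4]
  show (pvGet2 ((PySem.List.pyRange 0 (N : Int) 1).foldl
        (fun st i => (PySem.List.pyRange 0 (M : Int) 1).foldl (pvAInner grid i) st)
        (pvSet2 (List.replicate M (List.replicate N (0 : Int))) 0 0 (pvGet2 grid 0 0),
         (PySem.Dict.empty : PySem.Dict (Int × Int) (List String)).insert (0, 0) [""])).1
      (M-1) (N-1),
    ((PySem.List.pyRange 0 (N : Int) 1).foldl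
        (fun st i => (PySem.List.pyRange 0 (M : Int) 1).foldl (pvAInner grid i) st)
        (pvSet2 (List.replicate M (List.replicate N (0 : Int))) 0 0 (pvGet2 grid 0 0),
         (PySem.Dict.empty : PySem.Dict (Int × Int) (List String)).insert (0, 0) [""])).2.getD
      (((M-1 : Nat) : Int), ((N-1 : Nat) : Int)) [])
    = (dpf grid (M-1) (N-1), pathsf grid (M-1) (N-1))
  rw [hcell.1, hcell.2]

-- ===== VERDICT (by name: the statement is the Claim_ definition above) =====
theorem max_path_sum_bottomup_spec : Claim_equal_max_path_sum_bottomup := by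
  intro n m grid _ hpre
  obtain ⟨hn, hm, _, _⟩ := hpre
  unfold Spec_max_path_sum_bottomup
  have en : n = ((n.toNat : Nat) : Int) := by omega
  have em : m = ((m.toNat : Nat) : Int) := by omega
  rw [en, em, a_eq_math grid n.toNat m.toNat (by omega) (by omega),
    alt_eq_math grid n.toNat m.toNat (by omega) (by omega)]
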